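-- pv_equiv track=rewrite | github.com/arcasilesgroup/ai-engineering | src/ai_engineering/installer/templates.py | _dest_path_used_by_other_providers
-- ===== SOURCE A (Python) =====
-- _PROVIDER_FILE_MAPS: dict[str, dict[str, str]] = {
--     "claude_code": {
--         "CLAUDE.md": "CLAUDE.md",
--     },
--     "github_copilot": {
--         "AGENTS.md": "AGENTS.md",
--         "copilot-instructions.md": ".github/copilot-instructions.md",
--     },
--     "gemini": {
--         "AGENTS.md": "AGENTS.md",
--     },
--     "codex": {
--         "AGENTS.md": "AGENTS.md",
--     },
-- }
--
-- _PROVIDER_TREE_MAPS: dict[str, list[tuple[str, str]]] = {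
--     "claude_code": [
--         (".claude", ".claude"),
--     ],
--     "github_copilot": [
--         ("prompts", ".github/prompts"),
--         ("agents", ".github/agents"),
--         ("instructions", ".github/instructions"),
--     ],
--     "gemini": [
--         (".agents", ".agents"),
--     ],
--     "codex": [
--         (".agents", ".agents"),
--     ],
-- }
--
-- def _dest_path_used_by_other_providers(
--     dest_path: str,
--     provider: str,
--     active_providers: list[str],
-- ) -> bool:
--     """Check if a destination path is needed by another active provider.
--
--     Args:
--         dest_path: The destination path to check.
--         provider: The provider being removed.
--         active_providers: Currently active providers.
--
--     Returns:
--         True if another active provider also maps to this destination path.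
--     """
--     for other in active_providers:
--         if other == provider:
--             continue
--         other_files = _PROVIDER_FILE_MAPS.get(other, {})
--         if dest_path in other_files.values():
--             return True
--         for _src_tree, dest_tree in _PROVIDER_TREE_MAPS.get(other, []):
--             if dest_path == dest_tree:
--                 return True
--     return False
-- ===== SOURCE B (Python) =====
-- _PROVIDER_FILE_MAPS: dict[str, dict[str, str]] = {
--     "claude_code": {
--         "CLAUDE.md": "CLAUDE.md",
--     },
--     "github_copilot": {
--         "AGENTS.md": "AGENTS.md",
--         "copilot-instructions.md": ".github/copilot-instructions.md",
--     },
--     "gemini": {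
--         "AGENTS.md": "AGENTS.md",
--     },
--     "codex": {
--         "AGENTS.md": "AGENTS.md",
--     },
-- }
--
-- _PROVIDER_TREE_MAPS: dict[str, list[tuple[str, str]]] = {
--     "claude_code": [
--         (".claude", ".claude"),
--     ],
--     "github_copilot": [
--         ("prompts", ".github/prompts"),
--         ("agents", ".github/agents"),
--         ("instructions", ".github/instructions"),
--     ],
--     "gemini": [
--         (".agents", ".agents"),
--     ],
--     "codex": [
--         (".agents", ".agents"),
--     ],
-- }
--
-- # Inverted index built once: destination path -> set of providers that map to it.
-- _DEST_TO_PROVIDERS: dict[str, set[str]] = {}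
-- for _p, _files in _PROVIDER_FILE_MAPS.items():
--     for _dest in _files.values():
--         _DEST_TO_PROVIDERS.setdefault(_dest, set()).add(_p)
-- for _p, _pairs in _PROVIDER_TREE_MAPS.items():
--     for _src, _dest in _pairs:
--         _DEST_TO_PROVIDERS.setdefault(_dest, set()).add(_p)
--
--
-- def _dest_path_used_by_other_providers(
--     dest_path: str,
--     provider: str,
--     active_providers: list[str],
-- ) -> bool:
--     owners = _DEST_TO_PROVIDERS.get(dest_path, ())
--     return any(p != provider and p in owners for p in active_providers)
-- ===== Notes on version B (the rewrite author's own statement) =====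
-- stated objective: idiomatic
-- what changed: Replaces the per-provider nested scan of both constant maps with a module-level inverted index dest->set(providers) built once, so each call is a single dict lookup plus an any() over active providers.
import Mathlib
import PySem

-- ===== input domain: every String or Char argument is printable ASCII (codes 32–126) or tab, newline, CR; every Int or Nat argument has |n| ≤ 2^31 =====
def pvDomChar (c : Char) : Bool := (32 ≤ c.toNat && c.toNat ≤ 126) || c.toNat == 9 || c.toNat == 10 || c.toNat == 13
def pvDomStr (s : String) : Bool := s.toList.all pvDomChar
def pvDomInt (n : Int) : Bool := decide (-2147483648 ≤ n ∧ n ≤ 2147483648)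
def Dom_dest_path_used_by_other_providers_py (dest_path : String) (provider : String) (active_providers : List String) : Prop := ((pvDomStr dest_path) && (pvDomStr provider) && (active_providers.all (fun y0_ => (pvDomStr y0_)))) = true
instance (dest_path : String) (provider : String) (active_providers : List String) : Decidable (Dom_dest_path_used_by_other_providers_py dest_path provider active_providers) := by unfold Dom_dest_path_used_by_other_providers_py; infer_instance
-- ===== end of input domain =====

-- B replaces A's per-provider scan of the two constant maps by a dest->providers
-- inverted index built once, then a single lookup (objective: idiomatic).

-- ===== PORT A =====
def pvFileMaps : PySem.Dict String (PySem.Dict String String) :=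
  PySem.Dict.ofList [
    ("claude_code", PySem.Dict.ofList [("CLAUDE.md", "CLAUDE.md")]),
    ("github_copilot", PySem.Dict.ofList [("AGENTS.md", "AGENTS.md"),
      ("copilot-instructions.md", ".github/copilot-instructions.md")]),
    ("gemini", PySem.Dict.ofList [("AGENTS.md", "AGENTS.md")]),
    ("codex", PySem.Dict.ofList [("AGENTS.md", "AGENTS.md")])]

def pvTreeMaps : PySem.Dict String (List (String × String)) :=
  PySem.Dict.ofList [
    ("claude_code", [(".claude", ".claude")]),
    ("github_copilot", [("prompts", ".github/prompts"), ("agents", ".github/agents"),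
      ("instructions", ".github/instructions")]),
    ("gemini", [(".agents", ".agents")]),
    ("codex", [(".agents", ".agents")])]

-- body of A's loop for one `other` provider (the `continue` case handled by the caller)
def pvCheckOther (dest_path other : String) : Bool :=
  let other_files := (pvFileMaps.get? other).getD PySem.Dict.empty
  if (other_files.values).contains dest_path then true
  else ((pvTreeMaps.get? other).getD []).any (fun p => dest_path == p.2)

def pvLoopA (dest_path provider : String) : List String → Bool
  | [] => false
  | other :: rest =>
    if other == provider then pvLoopA dest_path provider rest
    else if pvCheckOther dest_path other then true
    else pvLoopA dest_path provider rest

def dest_path_used_by_other_providers_py (dest_path : String) (provider : String) (active_providers : List String) : Bool :=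
  pvLoopA dest_path provider active_providers

-- ===== PORT B =====
-- the module-level inverted index of Source B: dest -> set of providers mapping to it
def pvDestIndex : PySem.Dict String (PySem.Set String) :=
  let d1 := pvFileMaps.items.foldl
    (fun d pm => (pm.2.values).foldl
      (fun d dst => d.insert dst (PySem.Set.add (d.getD dst PySem.Set.empty) pm.1)) d)
    PySem.Dict.empty
  pvTreeMaps.items.foldl
    (fun d pt => pt.2.foldl
      (fun d pr => d.insert pr.2 (PySem.Set.add (d.getD pr.2 PySem.Set.empty) pt.1)) d)
    d1

def dest_path_used_by_other_providers_py_alt (dest_path : String) (provider : String) (active_providers : List String) : Bool :=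
  let owners := (pvDestIndex.get? dest_path).getD PySem.Set.empty
  active_providers.any (fun p => (p != provider) && PySem.Set.contains owners p)

-- ===== PRECONDITION & SPEC =====
def Spec_dest_path_used_by_other_providers_py (dest_path : String) (provider : String) (active_providers : List String) (out : Bool) : Prop := out = dest_path_used_by_other_providers_py_alt dest_path provider active_providers
instance (dest_path : String) (provider : String) (active_providers : List String) (out : Bool) : Decidable (Spec_dest_path_used_by_other_providers_py dest_path provider active_providers out) := by unfold Spec_dest_path_used_by_other_providers_py; infer_instance

-- ===== CLAIM (what is proved, stated in full; the proofs are below) =====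
def Claim_equal_dest_path_used_by_other_providers_py : Prop := ∀ (dest_path : String) (provider : String) (active_providers : List String), Dom_dest_path_used_by_other_providers_py dest_path provider active_providers → Spec_dest_path_used_by_other_providers_py dest_path provider active_providers (dest_path_used_by_other_providers_py dest_path provider active_providers)

-- ===== LEMMAS AND PROOFS =====

-- literal forms of the constant maps
lemma pvFileMaps_eq : pvFileMaps = PySem.Dict.mk [
    ("claude_code", PySem.Dict.mk [("CLAUDE.md", "CLAUDE.md")]),
    ("github_copilot", PySem.Dict.mk [("AGENTS.md", "AGENTS.md"),
      ("copilot-instructions.md", ".github/copilot-instructions.md")]),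
    ("gemini", PySem.Dict.mk [("AGENTS.md", "AGENTS.md")]),
    ("codex", PySem.Dict.mk [("AGENTS.md", "AGENTS.md")])] := by decide

lemma pvTreeMaps_eq : pvTreeMaps = PySem.Dict.mk [
    ("claude_code", [(".claude", ".claude")]),
    ("github_copilot", [("prompts", ".github/prompts"), ("agents", ".github/agents"),
      ("instructions", ".github/instructions")]),
    ("gemini", [(".agents", ".agents")]),
    ("codex", [(".agents", ".agents")])] := by decide

-- the inverted index as a literal
lemma pvDestIndex_eq : pvDestIndex = PySem.Dict.mk [
    ("CLAUDE.md", ["claude_code"]),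
    ("AGENTS.md", ["github_copilot", "gemini", "codex"]),
    (".github/copilot-instructions.md", ["github_copilot"]),
    (".claude", ["claude_code"]),
    (".github/prompts", ["github_copilot"]),
    (".github/agents", ["github_copilot"]),
    (".github/instructions", ["github_copilot"]),
    (".agents", ["gemini", "codex"])] := by decide

-- A's per-provider check agrees with membership in B's inverted index
set_option maxHeartbeats 2000000 in
lemma pvCheckOther_eq_index (dest o : String) :
    pvCheckOther dest o = PySem.Set.contains ((pvDestIndex.get? dest).getD PySem.Set.empty) o := by
  rw [pvDestIndex_eq]
  by_cases h1 : o = "claude_code"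
  · subst h1
    simp only [pvCheckOther, pvFileMaps_eq, pvTreeMaps_eq, PySem.Dict.get?_mk_cons]
    simp only [PySem.Dict.get?]
    norm_num [PySem.Set.contains, PySem.Dict.values]
    split_ifs <;> subst_vars <;> first | decide | simp_all [ne_comm]
  · by_cases h2 : o = "github_copilot"
    · subst h2
      simp only [pvCheckOther, pvFileMaps_eq, pvTreeMaps_eq, PySem.Dict.get?_mk_cons]
      simp only [PySem.Dict.get?]
      norm_num [PySem.Set.contains, PySem.Dict.values]
      split_ifs <;> subst_vars <;> first | decide | simp_all [ne_comm]
    · by_cases h3 : o = "gemini"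
      · subst h3
        simp only [pvCheckOther, pvFileMaps_eq, pvTreeMaps_eq, PySem.Dict.get?_mk_cons]
        simp only [PySem.Dict.get?]
        norm_num [PySem.Set.contains, PySem.Dict.values]
        split_ifs <;> subst_vars <;> first | decide | simp_all [ne_comm]
      · by_cases h4 : o = "codex"
        · subst h4
          simp only [pvCheckOther, pvFileMaps_eq, pvTreeMaps_eq, PySem.Dict.get?_mk_cons]
          simp only [PySem.Dict.get?]
          norm_num [PySem.Set.contains, PySem.Dict.values]
          split_ifs <;> subst_vars <;> first | decide | simp_all [ne_comm]
        · simp only [pvCheckOther, pvFileMaps_eq, pvTreeMaps_eq, PySem.Dict.get?_mk_cons,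
            beq_iff_eq, Ne.symm h1, Ne.symm h2, Ne.symm h3, Ne.symm h4, if_false]
          simp only [PySem.Dict.get?, PySem.Set.contains, Option.getD]
          norm_num [PySem.Dict.values]
          split_ifs <;> simp_all [PySem.Dict.empty]

-- A's early-return loop is B's any over the index lookup
lemma pvLoopA_eq_any (dest prov : String) (l : List String) :
    pvLoopA dest prov l =
      l.any (fun p => (p != prov) && PySem.Set.contains ((pvDestIndex.get? dest).getD PySem.Set.empty) p) := by
  induction l with
  | nil => simp [pvLoopA]
  | cons o rest ih =>
    simp only [List.any_cons]
    rw [← ih, ← pvCheckOther_eq_index]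
    by_cases h : o = prov
    · simp [pvLoopA, h]
    · cases hc : pvCheckOther dest o <;> simp [pvLoopA, h, hc]

-- ===== VERDICT (by name: the statement is the Claim_ definition above) =====
theorem dest_path_used_by_other_providers_py_spec : Claim_equal_dest_path_used_by_other_providers_py := by
  intro dest prov act _
  unfold Spec_dest_path_used_by_other_providers_py
  unfold dest_path_used_by_other_providers_py dest_path_used_by_other_providers_py_alt
  exact pvLoopA_eq_any dest prov act
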